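-- pv_equiv track=rewrite | github.com/Yawn-Sean/Daily_CF_Problems | daily_problems/2024/11/1113/personal_submission/cf963b_liryc.py | solve
-- ===== SOURCE A (Python) =====
-- from collections import deque
--
-- def solve(n: int, tg: list[list[int]]):
--     if not n & 1:
--         return []
--     ans = []
--     degree = [False] * (n + 1)
--         # child degree=1 -> remove later
--         # current degree=1 -> remove immediately + remove children with degree 1
--     dfsStk = []
--     i, childIndex = 1, 0
--     while True:
--         if childIndex == len(tg[i]):
--             parent = dfsStk[-1][0] if dfsStk else -1
--
--             # dfs out
--             dc = sum(degree[j] for j in tg[i] if j != parent)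
--             if i == 1 or (dc & 1):
--                 # BFS to perform removing
--                 dq = deque()
--                 dq.append((i, -1))
--                 while dq:
--                     j, p = dq.popleft()
--                     ans.append(j)
--                     for chld in tg[j]:
--                         if chld != p and degree[chld]:
--                             dq.append((chld, j))
--             else:
--                 degree[i] = True
--
--             if dfsStk:
--                 (i, childIndex) = dfsStk[-1]
--                 dfsStk.pop()
--                 continue
--             else:
--                 break
--         # elif childIndex == 0:
--         #     ## dfs in
--         #     pass
--
--         j = tg[i][childIndex]
--
--         if dfsStk and dfsStk[-1][0] == j: # skip parent
--             childIndex += 1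
--             continue
--         else:
--             # recursion
--             dfsStk.append((i, childIndex + 1))
--             i, childIndex = j, 0
--     return ans
-- ===== SOURCE B (Python) =====
-- def solve(n: int, tg: list[list[int]]):
--     if n % 2 == 0:
--         return []
--     # pass 1: iterative preorder traversal recording (vertex, parent) pairs
--     out = []
--     stk = [(1, -1)]
--     while stk:
--         u, p = stk.pop()
--         out.append((u, p))
--         for v in tg[u]:
--             if v != p:
--                 stk.append((v, u))
--     # pass 2: bottom-up sweep; reversed(out) is the postorder with children
--     # taken in adjacency order, so triggers fire in the same sequence
--     flag = [False] * (n + 1)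
--     ans = []
--     for u, p in reversed(out):
--         if u == 1 or sum(flag[j] for j in tg[u] if j != p) % 2:
--             q = [(u, -1)]  # collect u's flagged closure oldest-first
--             qi = 0
--             while qi < len(q):
--                 j, jp = q[qi]
--                 qi += 1
--                 ans.append(j)
--                 for c in tg[j]:
--                     if c != jp and flag[c]:
--                         q.append((c, j))
--         else:
--             flag[u] = True
--     return ans
-- ===== Notes on version B (the rewrite author's own statement) =====
-- stated objective: alternative
-- what changed: A's single interleaved while-loop DFS state machine (current node, childIndex cursor, explicit frame stack, flags and removals updated mid-traversal) is replaced by two staged passes: pass 1 is an iterative preorder that only records (vertex,parent) pairs on a push-down stack, pass 2 sweeps the reversed record (reversed preorder = the same postorder) applying the parity trigger, with the removal BFS run on an index-cursor list instead of a deque.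
-- outside the precondition, e.g. on solve(3, [[], [2, 2], [1, 1], []]): A returns [1, 2, 2], B returns [1, 2, 2]; on solve(3, [[], [], [3], [2]]): A returns [1], B returns [1]
import Mathlib
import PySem

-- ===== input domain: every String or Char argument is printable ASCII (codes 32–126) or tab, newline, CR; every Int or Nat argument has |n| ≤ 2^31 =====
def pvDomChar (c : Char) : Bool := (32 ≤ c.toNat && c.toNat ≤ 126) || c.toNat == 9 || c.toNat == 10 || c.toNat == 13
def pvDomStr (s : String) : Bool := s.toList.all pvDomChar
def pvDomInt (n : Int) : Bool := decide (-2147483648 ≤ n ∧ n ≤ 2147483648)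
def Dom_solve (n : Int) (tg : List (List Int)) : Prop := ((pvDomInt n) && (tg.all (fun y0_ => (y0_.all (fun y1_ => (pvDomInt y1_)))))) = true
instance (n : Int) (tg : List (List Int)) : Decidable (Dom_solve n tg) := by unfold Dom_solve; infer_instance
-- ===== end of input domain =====

-- B replaces A's single interleaved DFS state machine by two staged passes: an
-- iterative preorder pass recording (vertex,parent) pairs, then a bottom-up sweep
-- of the reversed record applying the same parity trigger; objective: alternative.

-- Shared primitives (identical code lines of both Pythons: tg[i] / degree[j]
-- access, degree[i] = True, the per-node finish step's dc sum and trigger).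
def getRow (tg : List (List Int)) (i : Int) : List Int := (PySem.List.pyGet? tg i).getD []

def degAt (deg : List Bool) (j : Int) : Bool := (PySem.List.pyGet? deg j).getD false

-- A's removal BFS (deque): pop (j,p), append j to ans, enqueue children chld ≠ p
-- with degree[chld].  The Nat fuel only guards totality (n+1 suffices on trees).
def bfsRun (tg : List (List Int)) (deg : List Bool) : Nat → List (Int × Int) → List Int → List Int
  | 0, _, ans => ans
  | _ + 1, [], ans => ans
  | f + 1, (j, p) :: dq, ans =>
      bfsRun tg deg f
        (dq ++ ((getRow tg j).filter (fun c => c != p && degAt deg c)).map (fun c => (c, j)))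
        (ans ++ [j])

-- dfs-out step at node i with parent p: dc = sum(degree[j] for j in tg[i] if j != p);
-- if i == 1 or dc odd, run the removal BFS, else degree[i] = True.
def finishNode (tg : List (List Int)) (fb : Nat) (i p : Int)
    (s : List Bool × List Int) : List Bool × List Int :=
  let dc := ((getRow tg i).filter (fun j => j != p)).foldl
              (fun a j => a + (if degAt s.1 j then 1 else 0)) (0 : Nat)
  if i = 1 ∨ dc % 2 = 1 then (s.1, bfsRun tg s.1 fb [(i, -1)] s.2)
  else (PySem.List.pySetD s.1 i true, s.2)

-- ===== PORT A =====
-- A's `while True` loop: current node i, child cursor ci, explicit stack of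
-- (node, next child index) frames; parent = stack top.  The Nat fuel b (one
-- unit per descent) only guards totality; n+1 suffices on the trees of Pre_.
def stackRem (tg : List (List Int)) (stk : List (Int × Nat)) : Nat :=
  (stk.map (fun f => (getRow tg f.1).length - f.2)).sum

def machineA (tg : List (List Int)) (fb : Nat) (b : Nat) (i : Int) (ci : Nat)
    (stk : List (Int × Nat)) (s : List Bool × List Int) : List Int :=
  if h : ci < (getRow tg i).length then
    let j := (getRow tg i).getD ci 0
    if (stk.head?.map Prod.fst) = some j then
      machineA tg fb b i (ci + 1) stk s                          -- skip parent
    else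
      match b with
      | 0 => s.2
      | b' + 1 => machineA tg fb b' j 0 ((i, ci + 1) :: stk) s   -- recursion: push
  else
    let p := match stk with | (q, _) :: _ => q | [] => -1
    let s' := finishNode tg fb i p s
    match stk with
    | [] => s'.2
    | (p', ci') :: stk' => machineA tg fb b p' ci' stk' s'       -- pop and resume
  termination_by (b, (getRow tg i).length - ci + stackRem tg stk, stk.length)
  decreasing_by
  · exact Prod.Lex.right _ (Prod.Lex.left _ _ (by omega))
  · exact Prod.Lex.left _ _ (by omega)
  · have hs : (getRow tg i).length - ci + stackRem tg ((p', ci') :: stk')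
        = (getRow tg p').length - ci' + stackRem tg stk' := by
      simp [stackRem]; omega
    rw [hs]
    exact Prod.Lex.right _ (Prod.Lex.right _ (by simp))

def solve (n : Int) (tg : List (List Int)) : List Int :=
  if n % 2 = 0 then []
  else machineA tg (n.toNat + 1) (n.toNat + 1) 1 0 []
        (List.replicate (n + 1).toNat false, [])

-- ===== PORT B =====
-- B's removal BFS: a plain list q read through an index cursor qi (no deque);
-- same visit order, same enqueue test.  Fuel only guards totality.
def bfsB (tg : List (List Int)) (deg : List Bool) : Nat → List (Int × Int) → Nat → List Int → List Int
  | 0, _, _, ans => ans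
  | f + 1, q, qi, ans =>
      if h : qi < q.length then
        bfsB tg deg f
          (q ++ ((getRow tg q[qi].1).filter (fun c => c != q[qi].2 && degAt deg c)).map (fun c => (c, q[qi].1)))
          (qi + 1) (ans ++ [q[qi].1])
      else ans

-- B's sweep body: same trigger as A's finish step, but removal via bfsB.
def finishNodeB (tg : List (List Int)) (fb : Nat) (u p : Int)
    (s : List Bool × List Int) : List Bool × List Int :=
  let dc := ((getRow tg u).filter (fun j => j != p)).foldl
              (fun a j => a + (if degAt s.1 j then 1 else 0)) (0 : Nat)
  if u = 1 ∨ dc % 2 = 1 then (s.1, bfsB tg s.1 fb [(u, -1)] 0 s.2)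
  else (PySem.List.pySetD s.1 u true, s.2)

-- B's pass 1: iterative preorder, popping (u,p), recording it, pushing the
-- non-parent neighbours (Python pushes in tg[u] order onto the list end, so the
-- reversed block sits on top of the head-is-top stack).  Fuel guards totality.
def pass1 (tg : List (List Int)) : Nat → List (Int × Int) → List (Int × Int) → List (Int × Int)
  | _, [], out => out
  | 0, _ :: _, out => out
  | f + 1, (u, p) :: stk, out =>
      pass1 tg f ((((getRow tg u).filter (fun v => v != p)).map (fun v => (v, u))).reverse ++ stk)
        (out ++ [(u, p)])

def solve_alt (n : Int) (tg : List (List Int)) : List Int :=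
  if n % 2 = 0 then []
  else
    ((pass1 tg (n.toNat + 1) [(1, -1)] []).reverse.foldl
      (fun s up => finishNodeB tg (n.toNat + 1) up.1 up.2 s)
      (List.replicate (n + 1).toNat false, [])).2

-- ===== PRECONDITION & SPEC =====
-- reachL tg k: vertices reachable from vertex 1 in at most k steps (BFS layers).
def reachL (tg : List (List Int)) : Nat → List Int
  | 0 => [1]
  | k + 1 =>
      let S := reachL tg k
      S ++ ((S.flatMap (getRow tg)).filter (fun v => ¬ S.contains v)).dedup

-- dOf tg N v: BFS depth of v from vertex 1 (N+1 when not reached within N+1 layers).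
def dOf (tg : List (List Int)) (N : Nat) (v : Int) : Nat :=
  (((List.range (N + 2)).find? (fun k => (reachL tg k).contains v)).getD (N + 1))

-- tg is the adjacency list of an undirected tree on 1..n rooted at 1, phrased by
-- BFS depths: every edge joins consecutive depths and every non-root vertex has
-- exactly one neighbour one level up (its unique parent).
def TreeCond (n : Int) (tg : List (List Int)) : Prop :=
  1 ≤ n ∧ (tg.length : Int) = n + 1 ∧
  (∀ i ∈ PySem.List.pyRange 1 (n + 1) 1,
      (∀ j ∈ getRow tg i, 1 ≤ j ∧ j ≤ n ∧ j ≠ i) ∧ (getRow tg i).Nodup ∧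
      (∀ j ∈ getRow tg i, i ∈ getRow tg j) ∧
      (∀ j ∈ getRow tg i, dOf tg n.toNat j + 1 = dOf tg n.toNat i ∨ dOf tg n.toNat i + 1 = dOf tg n.toNat j) ∧
      (i ≠ 1 → ((getRow tg i).filter (fun j => decide (dOf tg n.toNat j + 1 = dOf tg n.toNat i))).length = 1))

-- Pre_ excludes odd-n inputs whose tg is not such a tree: there A raises
-- IndexError or loops forever, or (multi-edge / disconnected adjacency) its
-- value is accidental; even n never touches tg.
def Pre_solve (n : Int) (tg : List (List Int)) : Prop := n % 2 = 0 ∨ TreeCond n tg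
instance (n : Int) (tg : List (List Int)) : Decidable (Pre_solve n tg) := by
  unfold Pre_solve TreeCond; infer_instance

def pvWitness_solve : Int × List (List Int) := (3, [[], [2], [1, 3], [2]])

def Spec_solve (n : Int) (tg : List (List Int)) (out : List Int) : Prop := out = solve_alt n tg
instance (n : Int) (tg : List (List Int)) (out : List Int) : Decidable (Spec_solve n tg out) := by unfold Spec_solve; infer_instance

-- ===== CLAIM (what is proved, stated in full; the proofs are below) =====
def Claim_equal_solve : Prop := ∀ (n : Int) (tg : List (List Int)), Dom_solve n tg → Pre_solve n tg → Spec_solve n tg (solve n tg)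

-- ===== LEMMAS AND PROOFS =====

-- parent as A reads it off the stack
def parentOf : List (Int × Nat) → Int
  | [] => -1
  | (q, _) :: _ => q

-- Recursive intermediate between the two ports: post-order dfs threading a fuel
-- budget exactly as machineA consumes it (one unit per descent).
def dfsB (tg : List (List Int)) (fb : Nat) (b : Nat) (u p : Int) (cs : List Int)
    (s : List Bool × List Int) : (List Bool × List Int) × Option Nat :=
  match cs with
  | [] => (finishNode tg fb u p s, some b)
  | j :: rest =>
    if j = p then dfsB tg fb b u p rest s
    else
      match b with
      | 0 => (s, none)
      | b' + 1 =>
        match dfsB tg fb b' j u (getRow tg j) s with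
        | (s₂, none) => (s₂, none)
        | (s₂, some b₂) => dfsB tg fb (min b₂ b') u p rest s₂
  termination_by (b, cs.length)
  decreasing_by
  · exact Prod.Lex.right _ (by simp)
  · exact Prod.Lex.left _ _ (by omega)
  · exact Prod.Lex.left _ _ (by omega)

-- B-side meaning of A's suspended stack frames: finish the remaining children
-- of each frame in turn (innermost first), feeding the state through.
def unwindB (tg : List (List Int)) (fb : Nat) :
    List (Int × Nat) → (List Bool × List Int) × Option Nat → List Int
  | _, (s, none) => s.2
  | [], (s, some _) => s.2
  | (p', ci') :: stk', (s, some b) =>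
      unwindB tg fb stk' (dfsB tg fb b p' (parentOf stk') ((getRow tg p').drop ci') s)

theorem unwindB_none (tg : List (List Int)) (fb : Nat) (stk : List (Int × Nat))
    (s : List Bool × List Int) : unwindB tg fb stk (s, none) = s.2 := by
  cases stk <;> rfl

theorem unwindB_nil (tg : List (List Int)) (fb : Nat)
    (r : (List Bool × List Int) × Option Nat) : unwindB tg fb [] r = r.1.2 := by
  obtain ⟨s, o⟩ := r; cases o <;> rfl

-- dfsB never returns more fuel than it was given
theorem dfsB_fuel_le (tg : List (List Int)) (fb : Nat) (b : Nat) (u p : Int)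
    (cs : List Int) (s : List Bool × List Int) :
    ∀ s₂ b₂, dfsB tg fb b u p cs s = (s₂, some b₂) → b₂ ≤ b := by
  fun_induction dfsB tg fb b u p cs s with
  | case1 b u p s => intro s₂ b₂ h; simp at h; omega
  | case2 b u s j rest ih => exact ih
  | case3 u p s j rest hne => intro s₂ b₂ h; simp at h
  | case4 u p s j rest hne b' s₂ hx ih => intro s₃ b₃ h; simp at h
  | case5 u p s j rest hne b' s₂ b₂ hx ih2 ih1 =>
      intro s₃ b₃ h
      have := ih1 s₃ b₃ h; omega

-- equation lemmas for dfsB's branches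
theorem dfsB_nil (tg : List (List Int)) (fb b : Nat) (u p : Int) (s : List Bool × List Int) :
    dfsB tg fb b u p [] s = (finishNode tg fb u p s, some b) := by
  rw [dfsB.eq_def]

theorem dfsB_cons_skip (tg : List (List Int)) (fb b : Nat) (u p j : Int)
    (rest : List Int) (s : List Bool × List Int) (hj : j = p) :
    dfsB tg fb b u p (j :: rest) s = dfsB tg fb b u p rest s := by
  rw [dfsB.eq_def]; simp only [if_pos hj]

theorem dfsB_cons_zero (tg : List (List Int)) (fb : Nat) (u p j : Int)
    (rest : List Int) (s : List Bool × List Int) (hj : j ≠ p) :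
    dfsB tg fb 0 u p (j :: rest) s = (s, none) := by
  rw [dfsB.eq_def]; simp only [if_neg hj]

theorem dfsB_cons_succ (tg : List (List Int)) (fb b' : Nat) (u p j : Int)
    (rest : List Int) (s : List Bool × List Int) (hj : j ≠ p) :
    dfsB tg fb (b' + 1) u p (j :: rest) s
      = (match dfsB tg fb b' j u (getRow tg j) s with
         | (s₂, none) => (s₂, none)
         | (s₂, some b₂) => dfsB tg fb (min b₂ b') u p rest s₂) := by
  rw [dfsB.eq_def]; simp only [if_neg hj]

-- Lockstep simulation: A's machine from any reachable configuration equals the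
-- recursion on the current node's remaining children, unwound through the stack.
theorem machine_sim (tg : List (List Int)) (fb : Nat)
    (h1 : (-1 : Int) ∉ getRow tg 1) (b : Nat) (i : Int) (ci : Nat)
    (stk : List (Int × Nat)) (s : List Bool × List Int) :
    (stk = [] → i = 1) → (∀ f, stk.getLast? = some f → f.1 = 1) →
    machineA tg fb b i ci stk s
      = unwindB tg fb stk (dfsB tg fb b i (parentOf stk) ((getRow tg i).drop ci) s) := by
  fun_induction machineA tg fb b i ci stk s with
  | case1 b i ci stk s h j hskip ih =>
      intro hr hl
      rw [List.drop_eq_getElem_cons h,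
          show (getRow tg i)[ci] = j from (List.getD_eq_getElem _ _ h).symm]
      cases stk with
      | nil => simp at hskip
      | cons f stk' =>
        obtain ⟨q, c⟩ := f
        have hq : j = q := by
          have := hskip; simp at this; omega
        rw [dfsB_cons_skip tg fb b i (parentOf ((q, c) :: stk')) j _ s (by simpa [parentOf] using hq)]
        exact ih hr hl
  | case2 i ci stk s h j hskip =>
      intro hr hl
      rw [List.drop_eq_getElem_cons h,
          show (getRow tg i)[ci] = j from (List.getD_eq_getElem _ _ h).symm]
      have hmem : j ∈ getRow tg i :=
        (show (getRow tg i)[ci] = j from (List.getD_eq_getElem _ _ h).symm) ▸ List.getElem_mem h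
      have hne : j ≠ parentOf stk := by
        cases stk with
        | nil =>
          intro hc
          have hm2 : (-1 : Int) ∈ getRow tg i := (show j = -1 from hc) ▸ hmem
          rw [hr rfl] at hm2
          exact h1 hm2
        | cons f stk' =>
          obtain ⟨q, c⟩ := f
          intro hc
          exact hskip (by simp [parentOf] at hc; simp [hc])
      rw [dfsB_cons_zero tg fb i (parentOf stk) j _ s hne, unwindB_none]
  | case3 i ci stk s h j hskip b' ih =>
      intro hr hl
      rw [List.drop_eq_getElem_cons h,
          show (getRow tg i)[ci] = j from (List.getD_eq_getElem _ _ h).symm]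
      have hmem : j ∈ getRow tg i :=
        (show (getRow tg i)[ci] = j from (List.getD_eq_getElem _ _ h).symm) ▸ List.getElem_mem h
      have hne : j ≠ parentOf stk := by
        cases stk with
        | nil =>
          intro hc
          have hm2 : (-1 : Int) ∈ getRow tg i := (show j = -1 from hc) ▸ hmem
          rw [hr rfl] at hm2
          exact h1 hm2
        | cons f stk' =>
          obtain ⟨q, c⟩ := f
          intro hc
          exact hskip (by simp [parentOf] at hc; simp [hc])
      rw [dfsB_cons_succ tg fb b' i (parentOf stk) j _ s hne]
      have hlast : ∀ f, ((i, ci + 1) :: stk).getLast? = some f → f.1 = 1 := by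
        intro f hf
        cases stk with
        | nil => simp at hf; rw [← hf]; exact hr rfl
        | cons g t => exact hl f (by simpa using hf)
      have ihh := ih (by simp) hlast
      simp only [List.drop_zero, show parentOf ((i, ci + 1) :: stk) = i from rfl] at ihh
      rw [ihh]
      rcases hres : dfsB tg fb b' j i (getRow tg j) s with ⟨s₂, o⟩
      cases o with
      | none =>
        show unwindB tg fb ((i, ci + 1) :: stk) (s₂, none)
          = unwindB tg fb stk ((s₂, none) : (List Bool × List Int) × Option Nat)
        rw [unwindB_none, unwindB_none]
      | some b₂ =>
        show unwindB tg fb ((i, ci + 1) :: stk) (s₂, some b₂)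
          = unwindB tg fb stk
              (dfsB tg fb (min b₂ b') i (parentOf stk) ((getRow tg i).drop (ci + 1)) s₂)
        rw [Nat.min_eq_left (dfsB_fuel_le tg fb b' j i (getRow tg j) s s₂ b₂ hres)]
        rfl
  | case4 b i ci s h p s' =>
      intro hr hl
      rw [List.drop_eq_nil_iff.mpr (by omega), dfsB_nil, unwindB_nil]
      rfl
  | case5 b i ci s h p' ci' stk' p s' ih =>
      intro hr hl
      rw [List.drop_eq_nil_iff.mpr (by omega), dfsB_nil,
          show unwindB tg fb ((p', ci') :: stk')
              (finishNode tg fb i (parentOf ((p', ci') :: stk')) s, some b)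
            = unwindB tg fb stk'
                (dfsB tg fb b p' (parentOf stk') ((getRow tg p').drop ci')
                  (finishNode tg fb i p' s)) from rfl]
      exact ih
        (by
          intro hnil
          have := hl (p', ci') (by simp [hnil])
          simpa using this)
        (by
          intro f hf
          cases stk' with
          | nil => simp at hf
          | cons g t => exact hl f (by simpa using hf))

-- ---- B-side: the cursor BFS is the deque BFS ----
theorem bfsB_eq_bfsRun (tg : List (List Int)) (deg : List Bool) :
    ∀ f q qi ans, qi ≤ q.length →
      bfsB tg deg f q qi ans = bfsRun tg deg f (q.drop qi) ans := by
  intro f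
  induction f with
  | zero => intro q qi ans _; rfl
  | succ f ih =>
    intro q qi ans hqi
    by_cases h : qi < q.length
    · rw [show bfsB tg deg (f + 1) q qi ans
          = bfsB tg deg f
              (q ++ ((getRow tg q[qi].1).filter (fun c => c != q[qi].2 && degAt deg c)).map (fun c => (c, q[qi].1)))
              (qi + 1) (ans ++ [q[qi].1]) from by rw [bfsB]; simp [h]]
      rw [ih _ _ _ (by simp [Nat.succ_le_iff]; omega)]
      rw [List.drop_eq_getElem_cons h]
      rw [List.drop_append_of_le_length (by omega)]
      rcases hq : q[qi] with ⟨j, p⟩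
      rw [bfsRun]
    · have he : qi = q.length := by omega
      rw [bfsB, dif_neg h, he, List.drop_length, bfsRun]

theorem finishNodeB_eq (tg : List (List Int)) (fb : Nat) (u p : Int)
    (s : List Bool × List Int) : finishNodeB tg fb u p s = finishNode tg fb u p s := by
  unfold finishNodeB finishNode
  rw [bfsB_eq_bfsRun tg s.1 fb [(u, -1)] 0 s.2 (by simp)]
  rfl

-- ---- depth facts ----
theorem dOf_le (tg : List (List Int)) (N : Nat) (v : Int) : dOf tg N v ≤ N + 1 := by
  unfold dOf
  cases h : (List.range (N + 2)).find? (fun k => (reachL tg k).contains v) with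
  | none => simp
  | some k =>
    have := List.mem_range.mp (List.mem_of_find?_eq_some h)
    simp
    omega

theorem dOf_one (tg : List (List Int)) (N : Nat) : dOf tg N 1 = 0 := by
  unfold dOf
  rw [List.range_succ_eq_map, List.find?_cons_of_pos (by simp [reachL])]
  rfl

-- good-graph bundle extracted from TreeCond (bounds form)
def Good (n : Int) (tg : List (List Int)) : Prop :=
  ∀ i : Int, 1 ≤ i → i ≤ n →
    (∀ j ∈ getRow tg i, 1 ≤ j ∧ j ≤ n ∧ j ≠ i) ∧ (getRow tg i).Nodup ∧
    (∀ j ∈ getRow tg i, i ∈ getRow tg j) ∧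
    (∀ j ∈ getRow tg i, dOf tg n.toNat j + 1 = dOf tg n.toNat i ∨ dOf tg n.toNat i + 1 = dOf tg n.toNat j) ∧
    (i ≠ 1 → ((getRow tg i).filter (fun j => decide (dOf tg n.toNat j + 1 = dOf tg n.toNat i))).length = 1)

-- canonical parent: the unique neighbour one level up
def parN (tg : List (List Int)) (N : Nat) (v : Int) : Int :=
  ((getRow tg v).filter (fun j => decide (dOf tg N j + 1 = dOf tg N v))).headI

theorem parN_eq (tg : List (List Int)) (N : Nat) (c w : Int)
    (hlen : ((getRow tg c).filter (fun j => decide (dOf tg N j + 1 = dOf tg N c))).length = 1)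
    (hw : w ∈ getRow tg c) (hd : dOf tg N w + 1 = dOf tg N c) : parN tg N c = w := by
  obtain ⟨a, ha⟩ := List.length_eq_one_iff.mp hlen
  have hwmem : w ∈ (getRow tg c).filter (fun j => decide (dOf tg N j + 1 = dOf tg N c)) :=
    List.mem_filter.mpr ⟨hw, by simp [hd]⟩
  rw [ha] at hwmem
  simp at hwmem
  unfold parN
  rw [ha, hwmem]
  rfl

-- traversal invariant at a node: in bounds, and every non-parent neighbour is
-- one level down with canonical parent this node
def HypP (n : Int) (tg : List (List Int)) (u p : Int) : Prop :=
  1 ≤ u ∧ u ≤ n ∧ ∀ c ∈ getRow tg u, c ≠ p →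
    dOf tg n.toNat c = dOf tg n.toNat u + 1 ∧ parN tg n.toNat c = u

theorem hyp_root (n : Int) (tg : List (List Int)) (H : Good n tg) (hn : 1 ≤ n) :
    HypP n tg 1 (-1) := by
  refine ⟨le_refl _, hn, ?_⟩
  intro c hc _
  obtain ⟨hrange, _, hsym, hpm, _⟩ := H 1 le_rfl hn
  have hcb := hrange c hc
  have hdc : dOf tg n.toNat c = dOf tg n.toNat 1 + 1 := by
    rcases hpm c hc with h | h
    · rw [dOf_one] at h; omega
    · omega
  refine ⟨hdc, ?_⟩
  obtain ⟨_, _, _, _, huniq⟩ := H c hcb.1 hcb.2.1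
  exact parN_eq tg n.toNat c 1 (huniq hcb.2.2) (hsym c hc) (by rw [hdc])

theorem hyp_step (n : Int) (tg : List (List Int)) (H : Good n tg) (u p c : Int)
    (hu : HypP n tg u p) (hc : c ∈ getRow tg u) (hcp : c ≠ p) : HypP n tg c u := by
  obtain ⟨hu1, hu2, hch⟩ := hu
  obtain ⟨hrangeU, _, hsymU, _, _⟩ := H u hu1 hu2
  have hcb := hrangeU c hc
  obtain ⟨hdc, hpc⟩ := hch c hc hcp
  have hc1 : c ≠ 1 := by
    intro h; rw [h, dOf_one] at hdc; omega
  obtain ⟨hrangeC, _, hsymC, hpmC, huniqC⟩ := H c hcb.1 hcb.2.1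
  refine ⟨hcb.1, hcb.2.1, ?_⟩
  intro c' hc' hc'u
  have hd' : dOf tg n.toNat c' = dOf tg n.toNat c + 1 := by
    rcases hpmC c' hc' with h | h
    · exfalso
      have := parN_eq tg n.toNat c c' (huniqC hc1) hc' h
      rw [hpc] at this
      exact hc'u this.symm
    · omega
  have hc'b := hrangeC c' hc'
  have hc'1 : c' ≠ 1 := by
    intro h; rw [h, dOf_one] at hd'; omega
  obtain ⟨_, _, _, _, huniqC'⟩ := H c' hc'b.1 hc'b.2.1
  exact ⟨hd', parN_eq tg n.toNat c' c (huniqC' hc'1) (hsymC c' hc') (by omega)⟩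

-- canonical fuel-truncated postorder unfolding (node,parent) of the tree
def postV (tg : List (List Int)) : Nat → Int → Int → List (Int × Int)
  | 0, _, _ => []
  | k + 1, u, p => ((getRow tg u).filter (fun c => c != p)).flatMap (fun c => postV tg k c u) ++ [(u, p)]

-- the per-node state step both sides perform, as a fold function
def stepF (tg : List (List Int)) (fb : Nat) (s : List Bool × List Int) (vp : Int × Int) :
    List Bool × List Int := finishNode tg fb vp.1 vp.2 s

-- dfsB computes the fold of finishNode over the postorder, consuming one fuel
-- unit per visited node
theorem dfsB_run (n : Int) (tg : List (List Int)) (H : Good n tg) (fb : Nat) :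
    ∀ k : Nat, ∀ u p : Int, HypP n tg u p → n.toNat + 2 ≤ dOf tg n.toNat u + k + 1 →
    ∀ cs : List Int, (∀ c ∈ cs, c ∈ getRow tg u) →
    ∀ b : Nat, ∀ s : List Bool × List Int,
      ((cs.filter (fun c => c != p)).map (fun c => (postV tg k c u).length)).sum ≤ b →
      dfsB tg fb b u p cs s
        = (finishNode tg fb u p
            (((cs.filter (fun c => c != p)).flatMap (fun c => postV tg k c u)).foldl (stepF tg fb) s),
           some (b - ((cs.filter (fun c => c != p)).map (fun c => (postV tg k c u).length)).sum)) := by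
  intro k
  induction k with
  | zero =>
    intro u p hu hinv cs hcs b s hb
    have hnone : cs.filter (fun c => c != p) = [] := by
      cases hF : cs.filter (fun c => c != p) with
      | nil => rfl
      | cons c rest =>
        exfalso
        have hcmem : c ∈ cs.filter (fun c => c != p) := by rw [hF]; exact List.mem_cons_self
        have hmf := List.mem_filter.mp hcmem
        have hd := (hu.2.2 c (hcs c hmf.1) (by simpa using hmf.2)).1
        have := dOf_le tg n.toNat c
        omega
    have hskipall : ∀ cs', (∀ c ∈ cs', c ∈ getRow tg u) → cs'.filter (fun c => c != p) = [] →
        dfsB tg fb b u p cs' s = (finishNode tg fb u p s, some b) := by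
      intro cs'
      induction cs' with
      | nil => intro _ _; exact dfsB_nil tg fb b u p s
      | cons c rest ihr =>
        intro hmem hfil
        have hcp : c = p := by
          by_contra hne
          simp [List.filter_cons, hne] at hfil
        rw [dfsB_cons_skip tg fb b u p c rest s hcp]
        exact ihr (fun x hx => hmem x (List.mem_cons_of_mem _ hx))
          (by simpa [List.filter_cons, hcp] using hfil)
    rw [hskipall cs hcs hnone, hnone]
    simp
  | succ k ihk =>
    intro u p hu hinv cs hcs b s hb
    induction cs generalizing b s with
    | nil => rw [dfsB_nil]; simp
    | cons c rest ihr =>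
      by_cases hcp : c = p
      · rw [dfsB_cons_skip tg fb b u p c rest s hcp]
        rw [ihr (fun x hx => hcs x (List.mem_cons_of_mem _ hx)) b s
          (by simpa [List.filter_cons, hcp] using hb)]
        simp [List.filter_cons, hcp]
      · have hcmem := hcs c List.mem_cons_self
        have hchild := (hu.2.2 c hcmem hcp).1
        have hhyp : HypP n tg c u := hyp_step n tg H u p c hu hcmem hcp
        have hfc : (c :: rest).filter (fun x => x != p) = c :: rest.filter (fun x => x != p) := by
          simp [List.filter_cons, hcp]
        have hlen1 : (postV tg (k + 1) c u).length
            = (((getRow tg c).filter (fun x => x != u)).map (fun x => (postV tg k x c).length)).sum + 1 := by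
          simp [postV, List.length_flatMap, Function.comp_def]
        rw [hfc] at hb
        simp only [List.map_cons, List.sum_cons] at hb
        obtain ⟨b', rfl⟩ : ∃ b', b = b' + 1 := ⟨b - 1, by omega⟩
        rw [dfsB_cons_succ tg fb b' u p c rest s hcp]
        have hrec := ihk c u hhyp (by omega) (getRow tg c) (fun x hx => hx) b' s (by omega)
        rw [hrec]
        simp only []
        rw [Nat.min_eq_left (Nat.sub_le _ _)]
        set mC := (((getRow tg c).filter (fun x => x != u)).map (fun x => (postV tg k x c).length)).sum with hmC
        have hs2 : finishNode tg fb c u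
              ((((getRow tg c).filter (fun x => x != u)).flatMap (fun x => postV tg k x c)).foldl (stepF tg fb) s)
            = (postV tg (k + 1) c u).foldl (stepF tg fb) s := by
          simp [postV, List.foldl_append, stepF]
        rw [hs2]
        rw [ihr (fun x hx => hcs x (List.mem_cons_of_mem _ hx)) (b' - mC)
          ((postV tg (k + 1) c u).foldl (stepF tg fb) s) (by omega)]
        rw [hfc]
        simp only [List.map_cons, List.sum_cons, List.flatMap_cons, List.foldl_append]
        have harith : b' - mC - ((rest.filter (fun x => x != p)).map (fun c => (postV tg (k + 1) c u).length)).sum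
            = b' + 1 - ((postV tg (k + 1) c u).length
                + ((rest.filter (fun x => x != p)).map (fun c => (postV tg (k + 1) c u).length)).sum) := by
          omega
        rw [harith]

theorem pass1_empty (tg : List (List Int)) (f : Nat) (out : List (Int × Int)) :
    pass1 tg f [] out = out := by
  cases f <;> rfl

-- pass 1 pops a whole subtree as its preorder, consuming one fuel unit per node
theorem pass1_run (n : Int) (tg : List (List Int)) (H : Good n tg) :
    ∀ k : Nat, ∀ u p : Int, HypP n tg u p → n.toNat + 2 ≤ dOf tg n.toNat u + k →
    ∀ b : Nat, ∀ stk out : List (Int × Int),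
      (postV tg k u p).length ≤ b →
      pass1 tg b ((u, p) :: stk) out
        = pass1 tg (b - (postV tg k u p).length) stk (out ++ (postV tg k u p).reverse) := by
  intro k
  induction k with
  | zero =>
    intro u p hu hinv
    exfalso
    have := dOf_le tg n.toNat u
    omega
  | succ k ihk =>
    intro u p hu hinv b stk out hb
    have hlen1 : (postV tg (k + 1) u p).length
        = (((getRow tg u).filter (fun x => x != p)).map (fun x => (postV tg k x u).length)).sum + 1 := by
      simp [postV, List.length_flatMap, Function.comp_def]
    obtain ⟨b', rfl⟩ : ∃ b', b = b' + 1 := ⟨b - 1, by omega⟩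
    have hstep : pass1 tg (b' + 1) ((u, p) :: stk) out
        = pass1 tg b' ((((getRow tg u).filter (fun v => v != p)).map (fun v => (v, u))).reverse ++ stk)
            (out ++ [(u, p)]) := by
      rw [pass1]
    rw [hstep]
    -- processing a block of pushed children one after the other
    have hrun : ∀ l : List Int, (∀ c ∈ l, c ∈ getRow tg u ∧ c ≠ p) →
        ∀ b out', (l.map (fun c => (postV tg k c u).length)).sum ≤ b →
        pass1 tg b (l.map (fun c => (c, u)) ++ stk) out'
          = pass1 tg (b - (l.map (fun c => (postV tg k c u).length)).sum) stk
              (out' ++ l.flatMap (fun c => (postV tg k c u).reverse)) := by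
      intro l
      induction l with
      | nil => intro _ b out' _; simp
      | cons c l' ihl =>
        intro hmem b out' hbl
        simp only [List.map_cons, List.sum_cons] at hbl
        have hcm := hmem c List.mem_cons_self
        have hhyp : HypP n tg c u := hyp_step n tg H u p c hu hcm.1 hcm.2
        have hdc := (hu.2.2 c hcm.1 hcm.2).1
        simp only [List.map_cons, List.cons_append]
        rw [ihk c u hhyp (by omega) b (l'.map (fun v => (v, u)) ++ stk) out' (by omega)]
        rw [ihl (fun x hx => hmem x (List.mem_cons_of_mem _ hx)) (b - (postV tg k c u).length)
          (out' ++ (postV tg k c u).reverse) (by omega)]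
        simp only [List.map_cons, List.sum_cons, List.flatMap_cons, List.append_assoc]
        congr 1
        omega
    have hpush : (((getRow tg u).filter (fun v => v != p)).map (fun v => (v, u))).reverse
        = (((getRow tg u).filter (fun v => v != p)).reverse).map (fun v => (v, u)) := by
      rw [List.map_reverse]
    rw [hpush]
    rw [hrun (((getRow tg u).filter (fun v => v != p)).reverse)
      (by
        intro c hc
        have := List.mem_reverse.mp hc
        have hmf := List.mem_filter.mp this
        exact ⟨hmf.1, by simpa using hmf.2⟩)
      b' (out ++ [(u, p)])
      (by
        rw [List.map_reverse, List.sum_reverse]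
        omega)]
    rw [List.map_reverse, List.sum_reverse]
    congr 1
    · omega
    · -- out ++ [(u,p)] ++ reversed forest blocks = out ++ (postV (k+1) u p).reverse
      have : (postV tg (k + 1) u p).reverse
          = (u, p) :: (((getRow tg u).filter (fun v => v != p)).reverse).flatMap
              (fun c => (postV tg k c u).reverse) := by
        simp [postV, List.reverse_append, List.reverse_flatMap]
        rfl
      rw [this]
      simp
    
-- vertices of the unfolding: in range, below u, ancestor chain through u; nodup
theorem postV_facts (n : Int) (tg : List (List Int)) (H : Good n tg) :
    ∀ k : Nat, ∀ u p : Int, HypP n tg u p →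
      (∀ vp ∈ postV tg k u p,
          1 ≤ vp.1 ∧ vp.1 ≤ n ∧ dOf tg n.toNat u ≤ dOf tg n.toNat vp.1 ∧
          (parN tg n.toNat)^[dOf tg n.toNat vp.1 - dOf tg n.toNat u] vp.1 = u) ∧
      ((postV tg k u p).map Prod.fst).Nodup := by
  intro k
  induction k with
  | zero => intro u p _; simp [postV]
  | succ k ihk =>
    intro u p hu
    have hrowfacts := H u hu.1 hu.2.1
    -- facts for a block list
    have hblocks : ∀ l : List Int, l.Nodup → (∀ c ∈ l, c ∈ getRow tg u ∧ c ≠ p) →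
        (∀ vp ∈ l.flatMap (fun c => postV tg k c u),
            1 ≤ vp.1 ∧ vp.1 ≤ n ∧ dOf tg n.toNat u + 1 ≤ dOf tg n.toNat vp.1 ∧
            (parN tg n.toNat)^[dOf tg n.toNat vp.1 - (dOf tg n.toNat u + 1)] vp.1 ∈ l) ∧
        ((l.flatMap (fun c => postV tg k c u)).map Prod.fst).Nodup := by
      intro l
      induction l with
      | nil => intro _ _; simp
      | cons c l' ihl =>
        intro hnd hmem
        have hcm := hmem c List.mem_cons_self
        have hhyp : HypP n tg c u := hyp_step n tg H u p c hu hcm.1 hcm.2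
        have hdc := (hu.2.2 c hcm.1 hcm.2).1
        obtain ⟨hblk, hblknd⟩ := ihk c u hhyp
        obtain ⟨hrest, hrestnd⟩ := ihl (List.Nodup.of_cons hnd)
          (fun x hx => hmem x (List.mem_cons_of_mem _ hx))
        have hcnotin := (List.nodup_cons.mp hnd).1
        constructor
        · intro vp hvp
          rw [List.flatMap_cons] at hvp
          rcases List.mem_append.mp hvp with hin | hin
          · obtain ⟨h1, h2, h3, h4⟩ := hblk vp hin
            refine ⟨h1, h2, by omega, ?_⟩
            have hm : dOf tg n.toNat vp.1 - (dOf tg n.toNat u + 1)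
                = (dOf tg n.toNat vp.1 - dOf tg n.toNat c) := by omega
            rw [hm]
            rw [h4]
            exact List.mem_cons_self
          · obtain ⟨h1, h2, h3, h4⟩ := hrest vp hin
            exact ⟨h1, h2, h3, List.mem_cons_of_mem _ h4⟩
        · simp only [List.flatMap_cons, List.map_append]
          rw [List.nodup_append]
          refine ⟨hblknd, hrestnd, ?_⟩
          intro v hv1 w hw2 hvw
          obtain ⟨vp1, hvp1, hfst1⟩ := List.mem_map.mp hv1
          obtain ⟨vp2, hvp2, hfst2⟩ := List.mem_map.mp hw2
          rw [hvw] at hfst1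
          obtain ⟨_, _, h31, h41⟩ := hblk vp1 hvp1
          obtain ⟨_, _, h32, h42⟩ := hrest vp2 hvp2
          -- same vertex in the c-block and a later block: its ancestor at the
          -- children's level would be two different children
          have hanc1 : (parN tg n.toNat)^[dOf tg n.toNat vp1.1 - (dOf tg n.toNat u + 1)] vp1.1 = c := by
            have hm : dOf tg n.toNat vp1.1 - (dOf tg n.toNat u + 1)
                = dOf tg n.toNat vp1.1 - dOf tg n.toNat c := by omega
            rw [hm, h41]
          have hveq : vp1.1 = vp2.1 := by rw [hfst1, hfst2]
          rw [hveq] at hanc1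
          rw [hanc1] at h42
          exact hcnotin h42
    have hforest := hblocks (((getRow tg u).filter (fun v => v != p)))
      (List.Nodup.filter _ hrowfacts.2.1)
      (fun x hx =>
        have hmf := List.mem_filter.mp hx
        ⟨hmf.1, by simpa using hmf.2⟩)
    obtain ⟨hfor, hfornd⟩ := hforest
    constructor
    · intro vp hvp
      rw [show postV tg (k + 1) u p
            = ((getRow tg u).filter (fun c => c != p)).flatMap (fun c => postV tg k c u) ++ [(u, p)]
          from rfl] at hvp
      rcases List.mem_append.mp hvp with hin | hin
      · obtain ⟨h1, h2, h3, h4⟩ := hfor vp hin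
        refine ⟨h1, h2, by omega, ?_⟩
        have hm : dOf tg n.toNat vp.1 - dOf tg n.toNat u
            = (dOf tg n.toNat vp.1 - (dOf tg n.toNat u + 1)) + 1 := by omega
        rw [hm, Function.iterate_succ_apply']
        set c := (parN tg n.toNat)^[dOf tg n.toNat vp.1 - (dOf tg n.toNat u + 1)] vp.1 with hc
        have hcmem := List.mem_filter.mp h4
        exact (hu.2.2 c hcmem.1 (by simpa using hcmem.2)).2
      · rw [show vp = (u, p) from by simpa using hin]
        exact ⟨hu.1, hu.2.1, le_refl _, by simp⟩
    · show ((postV tg (k+1) u p).map Prod.fst).Nodup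
      have : (postV tg (k+1) u p).map Prod.fst
          = ((((getRow tg u).filter (fun v => v != p)).flatMap (fun c => postV tg k c u)).map Prod.fst) ++ [u] := by
        simp [postV]
      rw [this, List.nodup_append]
      refine ⟨hfornd, List.nodup_singleton u, ?_⟩
      intro v hv1 w hw2 hvw
      have hwu : w = u := by simpa using hw2
      obtain ⟨vp, hvp, hfst⟩ := List.mem_map.mp hv1
      obtain ⟨_, _, h3, _⟩ := hfor vp hvp
      rw [hvw, hwu] at hfst
      rw [hfst] at h3
      omega

-- a nodup list of vertices of 1..n has at most n elements
theorem nodup_range_length (n : Int) (l : List Int) (hl : l.Nodup)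
    (hm : ∀ v ∈ l, 1 ≤ v ∧ v ≤ n) : l.length ≤ n.toNat := by
  have hsub : l.toFinset ⊆ Finset.Icc (1 : Int) n := by
    intro v hv
    have := hm v (List.mem_toFinset.mp hv)
    simp [Finset.mem_Icc]
    omega
  have h1 : l.length = l.toFinset.card := (List.toFinset_card_of_nodup hl).symm
  have h2 : (Finset.Icc (1 : Int) n).card = (n + 1 - 1).toNat := Int.card_Icc 1 n
  have h3 := Finset.card_le_card hsub
  omega

-- ===== VERDICT (by name: the statement is the Claim_ definition above) =====
theorem solve_spec : Claim_equal_solve := by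
  intro n tg hdom hpre
  unfold Spec_solve solve solve_alt
  by_cases he : n % 2 = 0
  · simp [he]
  · rcases hpre with he' | ht
    · exact absurd he' he
    obtain ⟨hn1, hlen, hrows⟩ := ht
    have H : Good n tg := by
      intro i h1 h2
      exact hrows i (by rw [PySem.List.mem_pyRange_one]; omega)
    have hyp1 : HypP n tg 1 (-1) := hyp_root n tg H hn1
    have h1n : (-1 : Int) ∉ getRow tg 1 := by
      intro hc
      have := ((H 1 le_rfl hn1).1 (-1) hc).1
      omega
    -- the complete postorder and its size bound
    obtain ⟨hfacts, hnodup⟩ := postV_facts n tg H (n.toNat + 2) 1 (-1) hyp1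
    have hlenP : (postV tg (n.toNat + 2) 1 (-1)).length ≤ n.toNat := by
      have := nodup_range_length n ((postV tg (n.toNat + 2) 1 (-1)).map Prod.fst) hnodup
        (by
          intro v hv
          obtain ⟨vp, hvp, hfst⟩ := List.mem_map.mp hv
          have := hfacts vp hvp
          rw [← hfst]
          exact ⟨this.1, this.2.1⟩)
      simpa using this
    have hsplit : (postV tg (n.toNat + 2) 1 (-1)).length
        = (((getRow tg 1).filter (fun x => x != (-1 : Int))).map
            (fun x => (postV tg (n.toNat + 1) x 1).length)).sum + 1 := by
      simp [postV, List.length_flatMap, Function.comp_def]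
    -- A side
    rw [if_neg he, if_neg he,
        machine_sim tg (n.toNat + 1) h1n (n.toNat + 1) 1 0 [] _ (fun _ => rfl) (by simp),
        unwindB_nil]
    have hA := dfsB_run n tg H (n.toNat + 1) (n.toNat + 1) 1 (-1) hyp1
      (by rw [dOf_one]; omega)
      (getRow tg 1) (fun _ h => h) (n.toNat + 1)
      (List.replicate (n + 1).toNat false, [])
      (by omega)
    simp only [List.drop_zero, show parentOf ([] : List (Int × Nat)) = -1 from rfl]
    rw [hA]
    -- B side
    have hB := pass1_run n tg H (n.toNat + 2) 1 (-1) hyp1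
      (by rw [dOf_one]; omega)
      (n.toNat + 1) [] [] (by omega)
    rw [hB, pass1_empty]
    simp only [List.nil_append, List.reverse_reverse]
    have hfun : (fun (s : List Bool × List Int) (up : Int × Int) =>
        finishNodeB tg (n.toNat + 1) up.1 up.2 s) = stepF tg (n.toNat + 1) := by
      funext s up
      rw [finishNodeB_eq]
      rfl
    rw [hfun]
    have hfold : (postV tg (n.toNat + 2) 1 (-1)).foldl (stepF tg (n.toNat + 1))
          (List.replicate (n + 1).toNat false, [])
        = finishNode tg (n.toNat + 1) 1 (-1)
            ((((getRow tg 1).filter (fun c => c != (-1 : Int))).flatMap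
                (fun c => postV tg (n.toNat + 1) c 1)).foldl (stepF tg (n.toNat + 1))
              (List.replicate (n + 1).toNat false, [])) := by
      simp [postV, List.foldl_append, stepF]
    rw [hfold]
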